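-- pv_equiv track=rewrite | github.com/bagelboy/adventofcode | day01/santa_elevator.py | follow_directions
-- ===== SOURCE A (Python) =====
-- def follow_directions(directions):
--     floor = 0
--     basement_position = 0
--     for position, direction in enumerate(directions, start=1):
--         if direction == '(':
--             floor += 1
--         elif direction == ')':
--             floor -= 1
--         if floor < 0 and basement_position == 0:
--             basement_position = position
--     return (floor, basement_position)
-- ===== SOURCE B (Python) =====
-- def follow_directions(directions):
--     # Build the running-floor table, then answer both questions from it.
--     floors = []
--     total = 0
--     for c in directions:
--         total += 1 if c == '(' else -1 if c == ')' else 0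
--         floors.append(total)
--     final = floors[-1] if floors else 0
--     basement = next((i + 1 for i, f in enumerate(floors) if f < 0), 0)
--     return (final, basement)
-- ===== Notes on version B (the rewrite author's own statement) =====
-- stated objective: alternative
-- what changed: Replaces A's single fused loop (floor accumulator plus basement latch with a guard) by building the running-floor prefix table once and then reading the final floor as its last entry and the basement position as the first 1-indexed negative entry.
import Mathlib
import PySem

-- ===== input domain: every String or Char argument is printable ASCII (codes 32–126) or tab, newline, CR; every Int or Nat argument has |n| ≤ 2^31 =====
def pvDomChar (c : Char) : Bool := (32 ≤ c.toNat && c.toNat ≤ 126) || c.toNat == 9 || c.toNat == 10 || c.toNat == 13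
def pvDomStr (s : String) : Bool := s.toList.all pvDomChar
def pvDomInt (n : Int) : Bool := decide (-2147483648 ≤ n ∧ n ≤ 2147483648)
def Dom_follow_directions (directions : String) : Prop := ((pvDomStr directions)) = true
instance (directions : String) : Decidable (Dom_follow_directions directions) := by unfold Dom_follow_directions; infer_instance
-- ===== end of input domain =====

-- B rebuilds A's fused loop as a prefix-table build plus two reads (last entry / first negative); alternative decomposition, same cost.

-- ===== PORT A =====
-- A's single loop over enumerate(directions, start=1), carrying (floor, basement_position, position).
def faLoop : List Char → Int → Int → Int → Int × Int
  | [], floor, bp, _ => (floor, bp)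
  | c :: cs, floor, bp, pos =>
    let floor' := if c = '(' then floor + 1 else if c = ')' then floor - 1 else floor
    let bp' := if floor' < 0 ∧ bp = 0 then pos else bp
    faLoop cs floor' bp' (pos + 1)

def follow_directions (directions : String) : Int × Int :=
  faLoop directions.toList 0 0 1

-- ===== PORT B =====
-- running-floor table: floors.append(total) for each char
def fdFloors : List Char → Int → List Int
  | [], _ => []
  | c :: cs, t =>
    let t' := t + (if c = '(' then 1 else if c = ')' then -1 else 0)
    t' :: fdFloors cs t'

-- next((i+1 for i, f in enumerate(floors) if f < 0), 0)
def fdBasement : List Int → Int → Int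
  | [], _ => 0
  | f :: fs, i => if f < 0 then i else fdBasement fs (i + 1)

def follow_directions_alt (directions : String) : Int × Int :=
  let floors := fdFloors directions.toList 0
  (floors.getLastD 0, fdBasement floors 1)

-- ===== PRECONDITION & SPEC =====
def Spec_follow_directions (directions : String) (out : Int × Int) : Prop := out = follow_directions_alt directions
instance (directions : String) (out : Int × Int) : Decidable (Spec_follow_directions directions out) := by unfold Spec_follow_directions; infer_instance

-- ===== CLAIM (what is proved, stated in full; the proofs are below) =====
def Claim_equal_follow_directions : Prop := ∀ (directions : String), Dom_follow_directions directions → Spec_follow_directions directions (follow_directions directions)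

-- ===== LEMMAS AND PROOFS =====
theorem fd_floor_eq (c : Char) (t : Int) :
    (if c = '(' then t + 1 else if c = ')' then t - 1 else t)
      = t + (if c = '(' then 1 else if c = ')' then -1 else 0) := by
  split_ifs <;> ring

theorem faLoop_fst (l : List Char) : ∀ (t bp pos : Int),
    (faLoop l t bp pos).1 = (fdFloors l t).getLastD t := by
  induction l with
  | nil => intro t bp pos; simp [faLoop, fdFloors]
  | cons c cs ih =>
    intro t bp pos
    simp only [faLoop, fdFloors, List.getLastD_cons]
    rw [ih, fd_floor_eq]

theorem faLoop_snd_ne (l : List Char) : ∀ (t bp pos : Int), bp ≠ 0 →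
    (faLoop l t bp pos).2 = bp := by
  induction l with
  | nil => intro t bp pos _; simp [faLoop]
  | cons c cs ih =>
    intro t bp pos h
    simp only [faLoop, h, and_false, if_false]
    exact ih _ _ _ h
theorem faLoop_snd (l : List Char) : ∀ (t pos : Int), 1 ≤ pos →
    (faLoop l t 0 pos).2 = fdBasement (fdFloors l t) pos := by
  induction l with
  | nil => intro t pos _; simp [faLoop, fdFloors, fdBasement]
  | cons c cs ih =>
    intro t pos hpos
    simp only [faLoop, fdFloors, fdBasement]
    rcases eq_or_ne c '(' with hc1 | hc1
    · subst hc1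
      simp only [and_true, reduceIte]
      by_cases h : t + 1 < 0
      · rw [if_pos h, if_pos h]
        exact faLoop_snd_ne cs _ _ _ (by omega)
      · rw [if_neg h, if_neg h]
        exact ih _ _ (by omega)
    · rcases eq_or_ne c ')' with hc2 | hc2
      · subst hc2
        simp only [and_true, Char.reduceEq, reduceIte, if_false]
        have e : t - 1 = t + -1 := by ring
        by_cases h : t + -1 < 0
        · rw [e, if_pos h, if_pos h]
          exact faLoop_snd_ne cs _ _ _ (by omega)
        · rw [e, if_neg h, if_neg h]
          exact ih _ _ (by omega)
      · simp only [hc1, hc2, if_false, and_true, add_zero]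
        by_cases h : t < 0
        · rw [if_pos h, if_pos h]
          exact faLoop_snd_ne cs _ _ _ (by omega)
        · rw [if_neg h, if_neg h]
          exact ih _ _ (by omega)

-- ===== VERDICT (by name: the statement is the Claim_ definition above) =====
theorem follow_directions_spec : Claim_equal_follow_directions := by
  intro s _
  unfold Spec_follow_directions follow_directions follow_directions_alt
  have h1 := faLoop_fst s.toList 0 0 1
  have h2 := faLoop_snd s.toList 0 1 (by norm_num)
  exact Prod.ext (by simpa using h1) (by simpa using h2)
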